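-- pv_equiv track=rewrite | github.com/d6ms/FeatureEnvy | Data/DataBase/create_test_data.py | split_package_name
-- ===== SOURCE A (Python) =====
-- PACKAGE_LENGTH = 5
--
-- def split_package_name(packageName):
--     splitted = packageName.split('.')
--     splitted = [name.lower() for name in splitted]
--     if len(splitted) >= PACKAGE_LENGTH:
--         splitted = splitted[-PACKAGE_LENGTH:]
--     else:
--         splitted = ['*'] * (PACKAGE_LENGTH - len(splitted)) + splitted
--     return splitted
-- ===== SOURCE B (Python) =====
-- PACKAGE_LENGTH = 5
--
-- def split_package_name(packageName):
--     # Build the result back-to-front: walk the segments from the end, lowering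
--     # each, stop once PACKAGE_LENGTH are collected, pad with '*' and reverse.
--     out = []
--     for seg in reversed(packageName.split('.')):
--         if len(out) == PACKAGE_LENGTH:
--             break
--         out.append(seg.lower())
--     while len(out) < PACKAGE_LENGTH:
--         out.append('*')
--     out.reverse()
--     return out
-- ===== Notes on version B (the rewrite author's own statement) =====
-- stated objective: alternative
-- what changed: B builds the result back-to-front: it walks the segments in reverse with an accumulator that lowers each segment and stops early at PACKAGE_LENGTH, pads with star sentinels in a while-loop, then reverses; A maps lower over all segments and branches between a tail slice and front padding.
import Mathlib
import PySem

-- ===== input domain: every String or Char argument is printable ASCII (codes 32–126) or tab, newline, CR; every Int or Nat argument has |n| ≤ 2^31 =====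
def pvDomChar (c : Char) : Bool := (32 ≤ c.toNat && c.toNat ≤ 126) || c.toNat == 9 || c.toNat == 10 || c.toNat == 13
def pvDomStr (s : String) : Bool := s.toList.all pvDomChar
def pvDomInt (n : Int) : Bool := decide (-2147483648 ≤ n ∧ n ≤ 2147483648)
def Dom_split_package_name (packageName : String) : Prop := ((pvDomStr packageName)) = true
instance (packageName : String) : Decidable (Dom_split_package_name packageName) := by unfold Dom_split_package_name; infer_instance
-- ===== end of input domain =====

-- B builds the answer back-to-front with an early-stop accumulator instead of A's
-- map + two-branch pad/truncate; objective: alternative decomposition, same cost.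

-- ===== PORT A =====
def split_package_name (packageName : String) : List String :=
  let splitted := (PySem.Str.split? packageName ".").getD []
  let splitted := splitted.map (fun name => PySem.Str.lower name)
  if 5 ≤ splitted.length then
    PySem.List.slice splitted (some (-5)) none
  else
    PySem.List.pyRepeat ["*"] (5 - (splitted.length : Int)) ++ splitted

-- ===== PORT B =====
-- the for-loop over reversed segments with break at length 5
def pvTakeLower : List String → List String → List String
  | [], out => out
  | seg :: rest, out =>
      if out.length == 5 then out else pvTakeLower rest (out ++ [PySem.Str.lower seg])

-- the while-loop padding with '*'
def pvPadStars (out : List String) : List String :=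
  if out.length < 5 then pvPadStars (out ++ ["*"]) else out
termination_by 5 - out.length
decreasing_by simp; omega

def split_package_name_alt (packageName : String) : List String :=
  (pvPadStars (pvTakeLower ((PySem.Str.split? packageName ".").getD []).reverse [])).reverse

-- ===== PRECONDITION & SPEC =====
def Spec_split_package_name (packageName : String) (out : List String) : Prop := out = split_package_name_alt packageName
instance (packageName : String) (out : List String) : Decidable (Spec_split_package_name packageName out) := by unfold Spec_split_package_name; infer_instance

-- ===== CLAIM (what is proved, stated in full; the proofs are below) =====
def Claim_equal_split_package_name : Prop := ∀ (packageName : String), Dom_split_package_name packageName → Spec_split_package_name packageName (split_package_name packageName)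

-- ===== LEMMAS AND PROOFS =====

theorem pvTakeLower_eq (rs : List String) (out : List String) (h : out.length ≤ 5) :
    pvTakeLower rs out = out ++ (rs.take (5 - out.length)).map PySem.Str.lower := by
  induction rs generalizing out with
  | nil => simp [pvTakeLower]
  | cons seg rest ih =>
      unfold pvTakeLower
      by_cases h5 : out.length = 5
      · simp [h5]
      · have : (out.length == 5) = false := by simp [h5]
        rw [this]
        simp only [if_neg Bool.false_ne_true]
        rw [ih (out ++ [PySem.Str.lower seg]) (by simp; omega)]
        have : 5 - out.length = (5 - (out ++ [PySem.Str.lower seg]).length) + 1 := by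
          simp; omega
        rw [this, List.take_succ_cons]
        simp

theorem pvPadStars_eq (out : List String) :
    pvPadStars out = out ++ List.replicate (5 - out.length) "*" := by
  by_cases h : out.length < 5
  · rw [pvPadStars, if_pos h, pvPadStars_eq (out ++ ["*"])]
    simp only [List.append_assoc, List.length_append]
    congr 1
    have : 5 - out.length = (5 - (out.length + 1)) + 1 := by omega
    rw [this]
    simp [List.replicate_succ]
  · rw [pvPadStars, if_neg h]
    have : 5 - out.length = 0 := by omega
    simp [this]
termination_by 5 - out.length
decreasing_by simp; omega

theorem alt_eq (ys : List String) :
    (pvPadStars (pvTakeLower ys.reverse [])).reverse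
    = (if 5 ≤ (ys.map PySem.Str.lower).length then
        PySem.List.slice (ys.map PySem.Str.lower) (some (-5)) none
      else
        PySem.List.pyRepeat ["*"] (5 - ((ys.map PySem.Str.lower).length : Int))
          ++ ys.map PySem.Str.lower) := by
  rw [pvTakeLower_eq _ _ (by simp), pvPadStars_eq]
  have hmap : (ys.reverse.take 5).map PySem.Str.lower
      = (ys.map PySem.Str.lower).reverse.take 5 := by
    rw [← List.map_reverse, ← List.map_take]
  simp only [List.nil_append, Nat.sub_zero, List.length_nil, List.length_map, List.length_take]
  rw [hmap, PySem.List.slice_from_neg_ofNat (ys.map PySem.Str.lower) 5 (by omega),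
      PySem.List.pyRepeat_singleton]
  rw [List.reverse_append, List.reverse_replicate, List.take_reverse, List.reverse_reverse]
  simp only [List.length_reverse, List.length_map]
  by_cases h : 5 ≤ ys.length
  · rw [if_pos (by simpa using h)]
    rw [show min 5 ys.length = 5 by omega, Nat.sub_self, List.replicate_zero, List.nil_append]
  · rw [if_neg (by simpa using h)]
    rw [show ys.length - 5 = 0 by omega, List.drop_zero]
    congr 1
    rw [show min 5 ys.length = ys.length by omega]
    congr 1
    omega

-- ===== VERDICT (by name: the statement is the Claim_ definition above) =====
theorem split_package_name_spec : Claim_equal_split_package_name := by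
  intro p _
  unfold Spec_split_package_name split_package_name split_package_name_alt
  exact (alt_eq ((PySem.Str.split? p ".").getD [])).symm
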